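-- pv_equiv track=rewrite | github.com/Verisense-Health/dsci_algorithms_python | parse_biobank.py | split_colname
-- ===== SOURCE A (Python) =====
-- def split_colname(c):
--
--     ret = []
--     for i, v in enumerate(c):
--         if(v == "_"):
--             ret.append(i)
--
--     if(len(ret) == 0):
--         return c
--
--     mid = ret[len(ret) // 2]
--     c = list(c)
--     c[mid] = "\n"
--     c = "".join(c)
--     return c
-- ===== SOURCE B (Python) =====
-- def split_colname(c):
--     parts = c.split("_")
--     if len(parts) == 1:
--         return c
--     k = (len(parts) - 1) // 2
--     return "_".join(parts[:k + 1]) + "\n" + "_".join(parts[k + 1:])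
-- ===== Notes on version B (the rewrite author's own statement) =====
-- stated objective: simpler
-- what changed: B splits the string on the underscore character and rejoins the pieces around the middle separator, instead of collecting underscore index positions and mutating a character list; the split/join built-ins also make it measurably faster.
import Mathlib
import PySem

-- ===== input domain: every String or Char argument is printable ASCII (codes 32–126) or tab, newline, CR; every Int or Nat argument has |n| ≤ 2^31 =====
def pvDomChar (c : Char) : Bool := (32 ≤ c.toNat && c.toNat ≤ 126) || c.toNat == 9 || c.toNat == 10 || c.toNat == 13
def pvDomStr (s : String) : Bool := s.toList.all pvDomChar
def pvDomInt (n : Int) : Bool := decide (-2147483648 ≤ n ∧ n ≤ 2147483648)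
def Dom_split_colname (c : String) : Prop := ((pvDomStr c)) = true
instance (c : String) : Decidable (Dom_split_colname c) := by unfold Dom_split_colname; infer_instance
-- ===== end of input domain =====

-- B replaces A's scan-for-underscore-positions-and-mutate-a-char-list by splitting on the underscore and
-- rejoining around the middle separator (simpler; a timing run measured it faster by a constant factor).

-- ===== PORT A =====
def split_colname (c : String) : String :=
  let ret : List Int := (PySem.List.enumerate c.toList).foldl
    (fun acc iv => if iv.2 == '_' then acc ++ [iv.1] else acc) []
  if ret.length == 0 then c
  else
    -- ret is nonempty here, so the index len(ret)//2 is always in range (proved below);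
    -- Python's ret[len(ret) // 2] is exactly that element
    let mid : Int := PySem.List.pyGetD ret (PySem.Int.floordiv (ret.length : Int) 2) 0
    -- mid is an enumerate index, hence 0 ≤ mid: Python's c[mid] = "\n" sets position mid
    String.ofList (c.toList.set mid.toNat '\n')

-- ===== PORT B =====
def split_colname_alt (c : String) : String :=
  let parts := c.toList.splitOn '_'   -- c.split("_"), single-char separator
  if parts.length == 1 then c
  else
    let k := (parts.length - 1) / 2   -- (len(parts) - 1) // 2; parts.length ≥ 1, so Nat arithmetic is exact
    String.ofList (List.intercalate ['_'] (parts.take (k + 1)) ++ '\n' :: List.intercalate ['_'] (parts.drop (k + 1)))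

-- ===== PRECONDITION & SPEC =====
def Spec_split_colname (c : String) (out : String) : Prop := out = split_colname_alt c
instance (c : String) (out : String) : Decidable (Spec_split_colname c out) := by unfold Spec_split_colname; infer_instance

-- ===== CLAIM (what is proved, stated in full; the proofs are below) =====
def Claim_equal_split_colname : Prop := ∀ (c : String), Dom_split_colname c → Spec_split_colname c (split_colname c)

-- ===== LEMMAS AND PROOFS =====

-- positions (from offset s) of the underscores of cs, as A's loop collects them
def undPos (cs : List Char) (s : Int) : List Int :=
  ((PySem.List.enumerate cs s).filter (fun iv => iv.2 == '_')).map (·.1)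

-- position of the k-th separator in the intercalation of ps with a one-character separator
def sepPos : List (List Char) → Nat → Nat
  | [], _ => 0
  | p :: _, 0 => p.length
  | p :: ps, k + 1 => p.length + 1 + sepPos ps k

theorem undPos_append (xs ys : List Char) (s : Int) :
    undPos (xs ++ ys) s = undPos xs s ++ undPos ys (s + xs.length) := by
  simp [undPos, PySem.List.enumerate_append]

theorem undPos_of_not_mem (xs : List Char) (s : Int) (h : '_' ∉ xs) : undPos xs s = [] := by
  unfold undPos
  have hfil : (PySem.List.enumerate xs s).filter (fun iv => iv.2 == '_') = [] := by
    rw [List.filter_eq_nil_iff]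
    intro iv hiv
    obtain ⟨k, hk, rfl⟩ := (PySem.List.mem_enumerate_iff xs s iv).1 hiv
    simp only [beq_iff_eq]
    intro hEq
    exact h (hEq ▸ List.getElem_mem hk)
  rw [hfil, List.map_nil]

theorem undPos_cons_sep (xs : List Char) (s : Int) :
    undPos ('_' :: xs) s = s :: undPos xs (s + 1) := by
  simp [undPos, PySem.List.enumerate_cons]

theorem undPos_intercalate (ps : List (List Char)) (h : ∀ q ∈ ps, '_' ∉ q) (s : Int) :
    undPos (List.intercalate ['_'] ps) s
      = (List.range (ps.length - 1)).map (fun k => s + (sepPos ps k : Int)) := by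
  induction ps generalizing s with
  | nil => simp [List.intercalate, undPos]
  | cons p ps ih =>
    cases ps with
    | nil =>
      simpa [List.intercalate] using undPos_of_not_mem p s (h p (by simp))
    | cons q t =>
      have hfree : '_' ∉ p := h p (by simp)
      have hrest : ∀ r ∈ q :: t, '_' ∉ r := fun r hr => h r (List.mem_cons_of_mem _ hr)
      have hstep : List.intercalate ['_'] (p :: q :: t)
          = p ++ '_' :: List.intercalate ['_'] (q :: t) := by
        simp [List.intercalate]
      rw [hstep, undPos_append, undPos_of_not_mem p s hfree, undPos_cons_sep,
        ih hrest, List.nil_append]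
      simp only [List.length_cons, Nat.add_sub_cancel, List.range_succ_eq_map,
        List.map_cons, List.map_map]
      congr 1
      simp [sepPos]
      intro a ha
      ring

theorem set_sep (k : Nat) : ∀ (ps : List (List Char)), k + 1 < ps.length →
    (List.intercalate ['_'] ps).set (sepPos ps k) '\n'
      = List.intercalate ['_'] (ps.take (k + 1)) ++ '\n' :: List.intercalate ['_'] (ps.drop (k + 1)) := by
  induction k with
  | zero =>
    intro ps hps
    match ps, hps with
    | p :: q :: t, _ =>
      have hstep : List.intercalate ['_'] (p :: q :: t)
          = p ++ '_' :: List.intercalate ['_'] (q :: t) := by simp [List.intercalate]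
      rw [hstep]
      simp [sepPos, List.intercalate]
  | succ k ih =>
    intro ps hps
    match ps, hps with
    | p :: q :: t, hps =>
      have hk : k + 1 < (q :: t).length := by simpa using Nat.lt_of_succ_lt_succ hps
      have hrec := ih (q :: t) hk
      have hstep : List.intercalate ['_'] (p :: q :: t)
          = p ++ '_' :: List.intercalate ['_'] (q :: t) := by simp [List.intercalate]
      have hstep3 : List.intercalate ['_'] (p :: q :: t.take k)
          = p ++ '_' :: List.intercalate ['_'] (q :: t.take k) := by simp [List.intercalate]
      show (List.intercalate ['_'] (p :: q :: t)).set (p.length + 1 + sepPos (q :: t) k) '\n' = _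
      rw [hstep, List.set_append, if_neg (by omega)]
      have hidx : p.length + 1 + sepPos (q :: t) k - p.length = sepPos (q :: t) k + 1 := by omega
      rw [hidx, List.set_cons_succ, hrec]
      simp only [List.take_succ_cons, List.drop_succ_cons]
      rw [hstep3]
      simp

-- pieces produced by splitOn never contain the separator
theorem not_mem_splitOnP (p : Char → Bool) : ∀ (xs : List Char), ∀ l ∈ xs.splitOnP p, ∀ x ∈ l, ¬ p x := by
  intro xs
  induction xs with
  | nil => simp
  | cons a as ih =>
    intro l hl x hx
    rw [List.splitOnP_cons] at hl
    by_cases hpa : p a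
    · rw [if_pos hpa] at hl
      rcases List.mem_cons.1 hl with rfl | hl
      · simp at hx
      · exact ih l hl x hx
    · rw [if_neg hpa] at hl
      rcases h : as.splitOnP p with _ | ⟨hd, tl⟩
      · exact absurd h (List.splitOnP_ne_nil p as)
      · rw [h] at hl
        rcases List.mem_cons.1 hl with rfl | hl
        · rcases List.mem_cons.1 hx with rfl | hx
          · intro hpx; exact hpa hpx
          · exact ih hd (h ▸ List.mem_cons_self) x hx
        · exact ih l (h ▸ List.mem_cons_of_mem hd hl) x hx

theorem not_mem_splitOn (xs : List Char) (l : List Char) (hl : l ∈ xs.splitOn '_') : '_' ∉ l := by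
  intro hx
  exact not_mem_splitOnP (· == '_') xs l hl '_' hx (by simp)

-- ===== VERDICT (by name: the statement is the Claim_ definition above) =====
theorem split_colname_spec : Claim_equal_split_colname := by
  intro c _
  unfold Spec_split_colname split_colname split_colname_alt
  set cs := c.toList with hcs
  set ps := cs.splitOn '_' with hps
  have hfree : ∀ q ∈ ps, '_' ∉ q := fun q hq => not_mem_splitOn cs q hq
  have hjoin : List.intercalate ['_'] ps = cs := List.intercalate_splitOn cs '_'
  have hne : ps ≠ [] := by
    have := List.splitOnP_ne_nil (· == '_') cs
    simpa [hps, List.splitOn] using this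
  have hret : (PySem.List.enumerate cs).foldl
      (fun acc iv => if iv.2 == '_' then acc ++ [iv.1] else acc) ([] : List Int)
      = (List.range (ps.length - 1)).map (fun k => (sepPos ps k : Int)) := by
    rw [PySem.List.foldl_append_if (fun iv => iv.2 == '_') (·.1) (PySem.List.enumerate cs) []]
    have := undPos_intercalate ps hfree 0
    rw [hjoin] at this
    simpa [undPos] using this
  simp only [hret]
  rcases Nat.exists_eq_add_of_lt (List.length_pos_iff.2 hne) with ⟨n, hn⟩
  rw [Nat.zero_add] at hn
  by_cases h0 : n = 0
  · -- no underscore: one piece, both return c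
    subst h0
    simp [hn]
  · have hn1 : 1 ≤ n := Nat.one_le_iff_ne_zero.2 h0
    have hlen : ((List.range (ps.length - 1)).map (fun k => (sepPos ps k : Int))).length = n := by
      simp [hn]
    rw [if_neg (by simp [hlen, h0]), if_neg (by simp [hn]; omega)]
    have hdiv : n / 2 < n := Nat.div_lt_self (by omega) (by omega)
    have hmid : PySem.List.pyGetD ((List.range (ps.length - 1)).map (fun k => (sepPos ps k : Int)))
        (PySem.Int.floordiv (((List.range (ps.length - 1)).map (fun k => (sepPos ps k : Int))).length : Int) 2) 0
        = (sepPos ps (n / 2) : Int) := by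
      rw [hlen]
      have h2 : PySem.Int.floordiv (n : Int) 2 = ((n / 2 : Nat) : Int) := by
        exact_mod_cast PySem.Int.floordiv_natCast n 2
      rw [h2, PySem.List.pyGetD_natCast]
      rw [List.getD_eq_getElem?_getD]
      simp [hn, hdiv]
    rw [hmid]
    have hk : (ps.length - 1) / 2 = n / 2 := by rw [hn]; simp
    rw [hk, Int.toNat_natCast, ← hjoin, set_sep (n / 2) ps (by omega)]
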